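-- pv_equiv track=rewrite | github.com/hertogp/jabs | jabs/ilf/comp.py | member_refs
-- ===== SOURCE A (Python) =====
-- def member_refs(dct):
--     'return a flat, expanded member list from, possible, recursive definition'
--     # dct is {name} -> set([name, ..]), which may refer to other names
--     for target, mbrs in dct.items():
--         heap = list(mbrs)  # mbrs name ('STR', name)
--         seen, dct[target] = [target], set([])
--         while heap:
--             nxt = heap.pop()
--             if nxt in seen:
--                 continue
--             seen.append(nxt)
--             if nxt in dct:
--                 heap.extend(list(dct[nxt]))
--             dct[target].add(nxt)
--
--     return dct
-- ===== SOURCE B (Python) =====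
-- def member_refs(dct):
--     'return a flat, expanded member list from, possible, recursive definition'
--     # Recursive depth-first expansion: a nested helper walks a name's members,
--     # recursing into members that are themselves defined, guarded by `seen`;
--     # each key's flat set is then written back into dct in place.
--     # (dct values are sets, so the visit order -- last-listed member first,
--     # as in the original -- is invisible to callers.)
--     for target in list(dct):
--         seen = {target}
--         flat = []
--
--         def walk(members):
--             for m in reversed(members):
--                 if m in seen:
--                     continue
--                 seen.add(m)
--                 flat.append(m)
--                 if m in dct:
--                     walk(list(dct[m]))
--
--         walk(list(dct[target]))
--         dct[target] = set(flat)
--     return dct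
-- ===== Notes on version B (the rewrite author's own statement) =====
-- stated objective: alternative
-- what changed: Replaces A's flat pop-and-skip worklist heap (and list-typed `seen`) with a recursive depth-first walk helper over each member list, visited-guarded by a set, whose collected result is written back into dct once per key.
import Mathlib
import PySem

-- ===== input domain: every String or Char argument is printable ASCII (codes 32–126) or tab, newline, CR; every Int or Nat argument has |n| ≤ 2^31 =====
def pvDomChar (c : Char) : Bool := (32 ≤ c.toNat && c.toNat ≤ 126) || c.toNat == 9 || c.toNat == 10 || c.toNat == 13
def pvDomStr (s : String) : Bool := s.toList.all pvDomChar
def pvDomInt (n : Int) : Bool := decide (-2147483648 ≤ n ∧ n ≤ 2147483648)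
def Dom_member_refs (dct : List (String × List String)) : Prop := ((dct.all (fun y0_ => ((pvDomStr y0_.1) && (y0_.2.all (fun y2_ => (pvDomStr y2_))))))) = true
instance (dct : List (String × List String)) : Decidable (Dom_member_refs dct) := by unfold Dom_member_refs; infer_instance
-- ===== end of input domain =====

-- B replaces A's pop-and-skip worklist heap with a recursive depth-first walk helper
-- (nested recursion over each member list, visited-guarded) whose per-key result is
-- written back once (objective: alternative). A mutates dct in place; B performs the
-- same mutation, and the equivalence proved here is about the returned value.


-- Shared termination lemmas (cited by both ports' `decreasing_by`).
theorem pvCntLe (U : List String) (p q : String → Bool) (h : ∀ x, p x = true → q x = true) :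
    (U.filter p).length ≤ (U.filter q).length := by
  induction U with
  | nil => simp
  | cons a us ih =>
    by_cases hp : p a = true
    · simp [hp, h a hp]; omega
    · simp only [List.filter_cons, Bool.not_eq_true] at *
      rw [hp]
      by_cases hq : q a = true <;> simp [hq] <;> omega

theorem pvCntLt (U seen : List String) (m : String) (hU : m ∈ U) (hm : seen.contains m = false) :
    (U.filter fun x => !((seen ++ [m]).contains x)).length <
      (U.filter fun x => !(seen.contains x)).length := by
  have hmono : ∀ x, (!((seen ++ [m]).contains x)) = true → (!(seen.contains x)) = true := by
    intro x hx
    simp only [List.contains_append, Bool.not_eq_true', Bool.or_eq_false_iff] at hx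
    simpa using hx.1
  induction U with
  | nil => cases hU
  | cons a us ih =>
    rw [List.filter_cons, List.filter_cons]
    by_cases ham : a = m
    · subst ham
      have c1 : (!((seen ++ [a]).contains a)) = false := by
        simp
      have c2 : (!(seen.contains a)) = true := by rw [hm]; rfl
      rw [c1, c2]
      have hle := pvCntLe us _ _ hmono
      simp only [Bool.false_eq_true, if_false]
      simp only [if_true]
      simp only [List.length_cons]
      omega
    · have e : (!((seen ++ [m]).contains a)) = (!(seen.contains a)) := by
        simp [ham]
      rw [e]
      have hU' : m ∈ us := by
        rcases List.mem_cons.mp hU with h | h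
        · exact absurd h.symm ham
        · exact h
      by_cases hs : (!(seen.contains a)) = true
      · rw [hs]
        simp only [if_true, List.length_cons]
        exact Nat.succ_lt_succ (ih hU')
      · have hs' : (!(seen.contains a)) = false := by
          revert hs; cases (!(seen.contains a)) <;> simp
        rw [hs']
        simp only [Bool.false_eq_true, if_false]
        exact ih hU'

theorem pvCntLtApp (U seen : List String) (m : String) (d : List String)
    (hU : m ∈ U) (hm : seen.contains m = false) :
    (U.filter fun x => !(((seen ++ [m]) ++ d).contains x)).length <
      (U.filter fun x => !(seen.contains x)).length := by
  have hmono : ∀ x, (!(((seen ++ [m]) ++ d).contains x)) = true →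
      (!((seen ++ [m]).contains x)) = true := by
    intro x hx
    simp only [List.contains_append, Bool.not_eq_true', Bool.or_eq_false_iff] at hx ⊢
    exact hx.1
  exact Nat.lt_of_le_of_lt (pvCntLe U _ _ hmono) (pvCntLt U seen m hU hm)

-- pop? xs (-1) inversion helper (Python's xs.pop(); cited by pvLoopA's body).
theorem pvPopSome {α : Type} (xs : List α) (x : α) (ys : List α)
    (h : PySem.List.pop? xs (-1) = some (x, ys)) : xs = ys ++ [x] := by
  rcases List.eq_nil_or_concat xs with rfl | ⟨zs, z, rfl⟩
  · cases h
  · rw [List.concat_eq_append, PySem.List.pop?_last] at h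
    cases h; simp

-- any value looked up in a Dict is among its flattened values
theorem pvGetDFlat (d : PySem.Dict String (List String)) (k x : String)
    (hx : x ∈ d.getD k []) : x ∈ d.values.flatten := by
  cases hg : d.get? k with
  | none => rw [PySem.Dict.getD_of_get?_eq_none _ _ hg] at hx; cases hx
  | some v =>
    rw [PySem.Dict.getD_of_get?_eq_some _ _ hg] at hx
    have hv : v ∈ d.values := by
      have := PySem.Dict.mem_items_of_get?_eq_some _ hg
      simp only [PySem.Dict.values]
      exact List.mem_map_of_mem this
    exact List.mem_flatten.mpr ⟨v, hv, hx⟩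

-- ===== PORT A =====
-- A's inner while-loop: pop from the end of a flat heap, skip seen names, extend
-- with a name's current members, add to dct[target].  The extra arguments U/h* are
-- termination bookkeeping only (every poppable name lies in U).
def pvLoopA (U : List String) (target : String) (dct : PySem.Dict String (List String))
    (seen heap : List String)
    (hheap : ∀ x ∈ heap, x ∈ U)
    (hdct : ∀ k : String, ∀ x ∈ dct.getD k [], x ∈ U) : PySem.Dict String (List String) :=
  match hp : PySem.List.pop? heap (-1) with
  | none => dct
  | some (nxt, heap') =>
    if hs : seen.contains nxt then
      pvLoopA U target dct seen heap'
        (fun x hx => hheap x (by rw [pvPopSome _ _ _ hp]; exact List.mem_append_left _ hx)) hdct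
    else
      let seen' := seen ++ [nxt]
      let heap'' := if dct.contains nxt then heap' ++ dct.getD nxt [] else heap'
      let dct' := dct.modify target [] (fun s => PySem.Set.add s nxt)
      pvLoopA U target dct' seen' heap''
        (by
          intro x hx
          have hsub : x ∈ heap' ∨ x ∈ dct.getD nxt [] := by
            by_cases hc : dct.contains nxt <;> simp only [heap'', hc] at hx <;>
              simp_all [List.mem_append]
          rcases hsub with h | h
          · exact hheap x (by rw [pvPopSome _ _ _ hp]; exact List.mem_append_left _ h)
          · exact hdct nxt x h)
        (by
          intro k x hx
          simp only [dct', PySem.Dict.getD_modify] at hx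
          split at hx
          · rcases (PySem.Set.mem_add _ _ _).mp hx with h | rfl
            · exact hdct target x h
            · exact hheap x (by rw [pvPopSome _ _ _ hp]; exact List.mem_append_right _ (by simp))
          · exact hdct k x hx)
termination_by ((U.filter fun x => !(seen.contains x)).length, heap.length)
decreasing_by
  · apply Prod.Lex.right
    rw [pvPopSome _ _ _ hp]; simp
  · apply Prod.Lex.left
    exact pvCntLt U seen nxt
      (hheap nxt (by rw [pvPopSome _ _ _ hp]; exact List.mem_append_right _ (by simp)))
      (by simpa using hs)

-- A's outer for-loop over the keys; Python's `for target, mbrs in dct.items()`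
-- reads each key's current members when it is reached.
def pvOuterA (keys : List String) (dct : PySem.Dict String (List String)) :
    PySem.Dict String (List String) :=
  match keys with
  | [] => dct
  | t :: ks =>
    let mbrs := dct.getD t []
    let dct1 := dct.insert t ([] : List String)
    pvOuterA ks
      (pvLoopA (mbrs ++ dct1.values.flatten) t dct1 [t] mbrs
        (fun x hx => List.mem_append_left _ hx)
        (fun k x hx => List.mem_append_right _ (pvGetDFlat dct1 k x hx)))

def member_refs (dct : List (String × List String)) : List (String × List String) :=
  (pvOuterA (PySem.Dict.mk dct).keys (PySem.Dict.mk dct)).items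

-- ===== PORT B =====
-- B's recursive walk helper: iterate a member list last-first, skip seen names,
-- recurse into names that are themselves keys; returns the list of newly visited
-- names in visit order (Python's `walk` grows `seen`/`flat` in place — here the
-- growth is returned as a delta and appended by the caller).  U/h* are termination
-- bookkeeping only.
def pvWalkB (U : List String) (dct : PySem.Dict String (List String))
    (seen ns : List String)
    (hns : ∀ x ∈ ns, x ∈ U)
    (hdct : ∀ k : String, ∀ x ∈ dct.getD k [], x ∈ U) : List String :=
  match ns with
  | [] => []
  | m :: rest =>
    if hs : seen.contains m = true then
      pvWalkB U dct seen rest (fun x hx => hns x (List.mem_cons_of_mem _ hx)) hdct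
    else if _hc : dct.contains m = true then
      let d1 := pvWalkB U dct (seen ++ [m]) ((dct.getD m []).reverse)
        (fun x hx => hdct m x (List.mem_reverse.mp hx)) hdct
      let d2 := pvWalkB U dct ((seen ++ [m]) ++ d1) rest
        (fun x hx => hns x (List.mem_cons_of_mem _ hx)) hdct
      m :: (d1 ++ d2)
    else
      m :: pvWalkB U dct (seen ++ [m]) rest
        (fun x hx => hns x (List.mem_cons_of_mem _ hx)) hdct
termination_by ((U.filter fun x => !(seen.contains x)).length, ns.length)
decreasing_by
  · apply Prod.Lex.right
    simp
  · apply Prod.Lex.left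
    exact pvCntLt U seen m (hns m (by simp)) (by simpa using hs)
  · apply Prod.Lex.left
    exact pvCntLtApp U seen m _ (hns m (by simp)) (by simpa using hs)
  · apply Prod.Lex.left
    exact pvCntLt U seen m (hns m (by simp)) (by simpa using hs)

-- B's outer for-loop: expand each key with the walk, then write the flat set back.
def pvOuterB (keys : List String) (dct : PySem.Dict String (List String)) :
    PySem.Dict String (List String) :=
  match keys with
  | [] => dct
  | t :: ks =>
    let mbrs := dct.getD t []
    let out := pvWalkB (mbrs ++ (dct.insert t ([] : List String)).values.flatten) dct
      [t] mbrs.reverse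
      (fun x hx => List.mem_append_left _ (List.mem_reverse.mp hx))
      (by
        intro k x hx
        by_cases hk : k = t
        · subst hk; exact List.mem_append_left _ hx
        · refine List.mem_append_right _ (pvGetDFlat _ k x ?_)
          rw [PySem.Dict.getD_insert_of_ne _ _ _ hk]
          exact hx)
    pvOuterB ks (dct.insert t out)

def member_refs_alt (dct : List (String × List String)) : List (String × List String) :=
  (pvOuterB (PySem.Dict.mk dct).keys (PySem.Dict.mk dct)).items

-- ===== PRECONDITION & SPEC =====
def Spec_member_refs (dct : List (String × List String)) (out : List (String × List String)) : Prop := out = member_refs_alt dct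
instance (dct : List (String × List String)) (out : List (String × List String)) : Decidable (Spec_member_refs dct out) := by unfold Spec_member_refs; infer_instance

-- ===== CLAIM (what is proved, stated in full; the proofs are below) =====
def Claim_equal_member_refs : Prop := ∀ (dct : List (String × List String)), Dom_member_refs dct → Spec_member_refs dct (member_refs dct)

-- ===== LEMMAS AND PROOFS =====

-- pvLoopA ignores its proof arguments (they are Props); rewrite its data arguments.
theorem pvLoopA_congr (U : List String) (target : String)
    (d d' : PySem.Dict String (List String)) (seen seen' heap heap' : List String)
    (h1 : d = d') (h2 : seen = seen') (h3 : heap = heap') (hh) (hd) (hh') (hd') :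
    pvLoopA U target d seen heap hh hd = pvLoopA U target d' seen' heap' hh' hd' := by
  subst h1; subst h2; subst h3; rfl

-- One-step equations for A's loop.
theorem pvLoopA_nil (U : List String) (target : String) (dct : PySem.Dict String (List String))
    (seen : List String) (h1) (h2) : pvLoopA U target dct seen [] h1 h2 = dct := by
  rw [pvLoopA.eq_def]
  rfl

theorem pvLoopA_concat_seen (U : List String) (target : String)
    (dct : PySem.Dict String (List String)) (seen heap' : List String) (nxt : String)
    (hc : seen.contains nxt = true) (h1) (h2) (h1') :
    pvLoopA U target dct seen (heap' ++ [nxt]) h1 h2 = pvLoopA U target dct seen heap' h1' h2 := by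
  rw [pvLoopA.eq_def]
  split
  · rename_i heq
    rw [PySem.List.pop?_last] at heq
    cases heq
  · rename_i a b heq
    rw [PySem.List.pop?_last] at heq
    cases heq
    rw [dif_pos hc]

theorem pvLoopA_concat_fresh (U : List String) (target : String)
    (dct : PySem.Dict String (List String)) (seen heap' : List String) (nxt : String)
    (hc : seen.contains nxt = false) (h1) (h2) (h1') (h2') :
    pvLoopA U target dct seen (heap' ++ [nxt]) h1 h2
      = pvLoopA U target (dct.modify target [] (fun s => PySem.Set.add s nxt)) (seen ++ [nxt])
          (if dct.contains nxt then heap' ++ dct.getD nxt [] else heap') h1' h2' := by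
  rw [pvLoopA.eq_def]
  split
  · rename_i heq
    rw [PySem.List.pop?_last] at heq
    cases heq
  · rename_i a b heq
    rw [PySem.List.pop?_last] at heq
    cases heq
    rw [dif_neg (by rw [hc]; exact Bool.false_ne_true)]

-- every name the walk returns lies in U
theorem pvWalkB_subset (U : List String) (dct : PySem.Dict String (List String))
    (seen ns : List String) (hns) (hdct) :
    ∀ x ∈ pvWalkB U dct seen ns hns hdct, x ∈ U := by
  fun_induction pvWalkB U dct seen ns hns hdct with
  | case1 seen hns hnsd => simp
  | case2 seen m rest hns hs hnsd ih => exact ih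
  | case3 seen m rest hns hs hc d1 d2 hnsd ih1 ih1b ih2 =>
    intro x hx
    rcases List.mem_cons.mp hx with rfl | hx
    · exact hns x (by simp)
    · rcases List.mem_append.mp hx with h | h
      · exact ih1 x h
      · exact ih2 x h
  | case4 seen m rest hns hs hc hnsd ih =>
    intro x hx
    rcases List.mem_cons.mp hx with rfl | hx
    · exact hns x (by simp)
    · exact ih x hx

-- modifying the just-inserted key rewrites its value in place
theorem pvModIns (d : PySem.Dict String (List String)) (k : String) (v : List String)
    (f : List String → List String) :
    (d.insert k v).modify k [] f = d.insert k (f v) := by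
  simp [PySem.Dict.modify, PySem.Dict.getD_insert_self, PySem.Dict.insert_insert_self]

-- Simulation: with A's dict being dct0 with `target ↦ out`, running A's heap loop on
-- (K ++ ns.reverse) equals first performing B's walk on ns (appending its delta to
-- seen and to out) and then continuing A's loop on K alone.
theorem pvSIM (U : List String) (target : String) (dct0 : PySem.Dict String (List String))
    (seen ns : List String) (hns : ∀ x ∈ ns, x ∈ U)
    (hd0 : ∀ k : String, ∀ x ∈ dct0.getD k [], x ∈ U) :
    ∀ (out K : List String),
      target ∈ seen →
      (∀ x ∈ out, x ∈ seen) →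
      (∀ x ∈ K, x ∈ U) →
      (∀ x ∈ out, x ∈ U) →
      ∀ (hh) (hd) (hh') (hd'),
      pvLoopA U target (dct0.insert target out) seen (K ++ ns.reverse) hh hd
        = pvLoopA U target
            (dct0.insert target (out ++ pvWalkB U dct0 seen ns hns hd0))
            (seen ++ pvWalkB U dct0 seen ns hns hd0) K hh' hd' := by
  fun_induction pvWalkB U dct0 seen ns hns hd0 with
  | case1 seen hns hnsd =>
    intro out K htgt hout hK houtU hh hd hh' hd'
    exact pvLoopA_congr U target _ _ _ _ _ _ (by simp) (by simp) (by simp) hh hd hh' hd'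
  | case2 seen m rest hns hs hnsd ih =>
    intro out K htgt hout hK houtU hh hd hh' hd'
    have hh0 : ∀ x ∈ (K ++ rest.reverse) ++ [m], x ∈ U := by
      intro x hx; apply hh; simpa using hx
    have hh1 : ∀ x ∈ K ++ rest.reverse, x ∈ U := fun x hx => hh0 x (List.mem_append_left _ hx)
    refine Eq.trans (pvLoopA_congr U target _ _ _ _ _ _ rfl rfl (by simp) hh hd hh0 hd) ?_
    refine Eq.trans (pvLoopA_concat_seen U target _ seen _ m hs _ hd hh1) ?_
    exact ih out K htgt hout hK houtU hh1 hd hh' hd'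
  | case3 seen m rest hns hs hc d1 d2 hnsd ih1 ih1b ih2 =>
    intro out K htgt hout hK houtU hh hd hh' hd'
    have hsf : seen.contains m = false := by simpa using hs
    have hmseen : m ∉ seen := by
      intro hm; rw [List.contains_eq_mem] at hsf; simp [hm] at hsf
    have hmt : m ≠ target := fun e => hmseen (e ▸ htgt)
    have hmU : m ∈ U := hns m (by simp)
    have hmout : out.contains m = false := by
      cases h : out.contains m
      · rfl
      · exfalso; rw [List.contains_eq_mem] at h; exact hmseen (hout m (by simpa using h))
    have hd1U : ∀ x ∈ d1, x ∈ U := fun x hx => pvWalkB_subset U dct0 _ _ _ _ x hx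
    have hd2U : ∀ x ∈ d2, x ∈ U := fun x hx => pvWalkB_subset U dct0 _ _ _ _ x hx
    -- A side: reorder the heap and pop m
    have hh0 : ∀ x ∈ (K ++ rest.reverse) ++ [m], x ∈ U := by
      intro x hx; apply hh; simpa using hx
    have hcontA : (dct0.insert target out).contains m = true := by
      rw [PySem.Dict.contains_insert]
      have : (m == target) = false := by simp [hmt]
      rw [this, hc]; rfl
    have hgetA : (dct0.insert target out).getD m [] = dct0.getD m [] :=
      PySem.Dict.getD_insert_of_ne _ _ _ hmt
    have hh1 : ∀ x ∈ (K ++ rest.reverse) ++ dct0.getD m [], x ∈ U := by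
      intro x hx
      rcases List.mem_append.mp hx with h | h
      · exact hh0 x (List.mem_append_left _ h)
      · exact hd0 m x h
    have hhKr : ∀ x ∈ K ++ rest.reverse, x ∈ U :=
      fun x hx => hh0 x (List.mem_append_left _ hx)
    have hd1' : ∀ k : String, ∀ x ∈ (dct0.insert target (out ++ [m])).getD k [], x ∈ U := by
      intro k x hx
      by_cases hk : k = target
      · rw [hk] at hx
        rw [PySem.Dict.getD_insert_self] at hx
        rcases List.mem_append.mp hx with h | h
        · exact houtU x h
        · simp at h; subst h; exact hmU
      · rw [PySem.Dict.getD_insert_of_ne _ _ _ hk] at hx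
        exact hd0 k x hx
    have hd2' : ∀ k : String, ∀ x ∈ (dct0.insert target ((out ++ [m]) ++ d1)).getD k [], x ∈ U := by
      intro k x hx
      by_cases hk : k = target
      · rw [hk] at hx
        rw [PySem.Dict.getD_insert_self] at hx
        rcases List.mem_append.mp hx with h | h
        · exact hd1' target x (by rw [PySem.Dict.getD_insert_self]; exact h)
        · exact hd1U x h
      · rw [PySem.Dict.getD_insert_of_ne _ _ _ hk] at hx
        exact hd0 k x hx
    have hh2 : ∀ x ∈ (K ++ rest.reverse) ++ ((dct0.getD m []).reverse).reverse, x ∈ U := by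
      intro x hx; rw [List.reverse_reverse] at hx; exact hh1 x hx
    have hstep : (dct0.insert target out).modify target [] (fun s => PySem.Set.add s m)
        = dct0.insert target (out ++ [m]) := by
      rw [pvModIns]
      congr 1
      simp only [PySem.Set.add, PySem.Set.contains, hmout, Bool.false_eq_true, if_false]
    have hheapstep : (if (dct0.insert target out).contains m
          then (K ++ rest.reverse) ++ (dct0.insert target out).getD m []
          else (K ++ rest.reverse))
        = (K ++ rest.reverse) ++ ((dct0.getD m []).reverse).reverse := by
      rw [if_pos (by rw [hcontA]), hgetA, List.reverse_reverse]
    refine Eq.trans (pvLoopA_congr U target _ _ _ _ _ _ rfl rfl (by simp) hh hd hh0 hd) ?_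
    refine Eq.trans (pvLoopA_concat_fresh U target _ seen _ m hsf hh0 hd
      (by
        intro x hx
        rw [if_pos hcontA, hgetA] at hx
        exact hh1 x hx)
      (by
        intro k x hx
        rw [hstep] at hx
        exact hd1' k x hx)) ?_
    refine Eq.trans (pvLoopA_congr U target _ _ _ _ _ _ hstep rfl hheapstep _ _ hh2 hd1') ?_
    refine Eq.trans (ih1 (out ++ [m]) (K ++ rest.reverse)
      (List.mem_append_left _ htgt)
      (by
        intro x hx
        rcases List.mem_append.mp hx with h | h
        · exact List.mem_append_left _ (hout x h)
        · exact List.mem_append_right _ h)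
      (by
        intro x hx
        rcases List.mem_append.mp hx with h | h
        · exact hK x h
        · exact hns x (List.mem_cons_of_mem _ (List.mem_reverse.mp h)))
      (by
        intro x hx
        rcases List.mem_append.mp hx with h | h
        · exact houtU x h
        · simp at h; subst h; exact hmU)
      hh2 hd1' hhKr hd2') ?_
    refine Eq.trans (ih2 ((out ++ [m]) ++ d1) K
      (List.mem_append_left _ (List.mem_append_left _ htgt))
      (by
        intro x hx
        rcases List.mem_append.mp hx with h | h
        · rcases List.mem_append.mp h with h2 | h2
          · exact List.mem_append_left _ (List.mem_append_left _ (hout x h2))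
          · exact List.mem_append_left _ (List.mem_append_right _ h2)
        · exact List.mem_append_right _ h)
      hK
      (by
        intro x hx
        rcases List.mem_append.mp hx with h | h
        · rcases List.mem_append.mp h with h2 | h2
          · exact houtU x h2
          · simp at h2; subst h2; exact hmU
        · exact hd1U x h)
      hhKr hd2' hh'
      (by
        intro k x hx
        by_cases hk : k = target
        · rw [hk] at hx
          rw [PySem.Dict.getD_insert_self] at hx
          rcases List.mem_append.mp hx with h | h
          · exact hd2' target x (by rw [PySem.Dict.getD_insert_self]; exact h)
          · exact hd2U x h
        · rw [PySem.Dict.getD_insert_of_ne _ _ _ hk] at hx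
          exact hd0 k x hx)) ?_
    exact pvLoopA_congr U target _ _ _ _ _ _
      (congrArg _ (by rw [List.append_assoc, List.append_assoc]; rfl))
      (by rw [List.append_assoc, List.append_assoc]; rfl)
      rfl _ _ hh' hd'
  | case4 seen m rest hns hs hc hnsd ih =>
    intro out K htgt hout hK houtU hh hd hh' hd'
    have hsf : seen.contains m = false := by simpa using hs
    have hcf : dct0.contains m = false := by simpa using hc
    have hmseen : m ∉ seen := by
      intro hm; rw [List.contains_eq_mem] at hsf; simp [hm] at hsf
    have hmt : m ≠ target := fun e => hmseen (e ▸ htgt)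
    have hmU : m ∈ U := hns m (by simp)
    have hmout : out.contains m = false := by
      cases h : out.contains m
      · rfl
      · exfalso; rw [List.contains_eq_mem] at h; exact hmseen (hout m (by simpa using h))
    have hh0 : ∀ x ∈ (K ++ rest.reverse) ++ [m], x ∈ U := by
      intro x hx; apply hh; simpa using hx
    have hh1 : ∀ x ∈ K ++ rest.reverse, x ∈ U := fun x hx => hh0 x (List.mem_append_left _ hx)
    have hcontA : (dct0.insert target out).contains m = false := by
      rw [PySem.Dict.contains_insert]
      have : (m == target) = false := by simp [hmt]
      rw [this, hcf]; rfl
    have hd1' : ∀ k : String, ∀ x ∈ (dct0.insert target (out ++ [m])).getD k [], x ∈ U := by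
      intro k x hx
      by_cases hk : k = target
      · rw [hk] at hx
        rw [PySem.Dict.getD_insert_self] at hx
        rcases List.mem_append.mp hx with h | h
        · exact houtU x h
        · simp at h; subst h; exact hmU
      · rw [PySem.Dict.getD_insert_of_ne _ _ _ hk] at hx
        exact hd0 k x hx
    have hstep : (dct0.insert target out).modify target [] (fun s => PySem.Set.add s m)
        = dct0.insert target (out ++ [m]) := by
      rw [pvModIns]
      congr 1
      simp only [PySem.Set.add, PySem.Set.contains, hmout, Bool.false_eq_true, if_false]
    have hheapstep : (if (dct0.insert target out).contains m
          then (K ++ rest.reverse) ++ (dct0.insert target out).getD m []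
          else (K ++ rest.reverse))
        = K ++ rest.reverse := by
      rw [if_neg (by rw [hcontA]; exact Bool.false_ne_true)]
    refine Eq.trans (pvLoopA_congr U target _ _ _ _ _ _ rfl rfl (by simp) hh hd hh0 hd) ?_
    refine Eq.trans (pvLoopA_concat_fresh U target _ seen _ m hsf hh0 hd
      (by
        intro x hx
        rw [if_neg (by rw [hcontA]; exact Bool.false_ne_true)] at hx
        exact hh1 x hx)
      (by
        intro k x hx
        rw [hstep] at hx
        exact hd1' k x hx)) ?_
    refine Eq.trans (pvLoopA_congr U target _ _ _ _ _ _ hstep rfl hheapstep _ _ hh1 hd1') ?_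
    refine Eq.trans (ih (out ++ [m]) K
      (List.mem_append_left _ htgt)
      (by
        intro x hx
        rcases List.mem_append.mp hx with h | h
        · exact List.mem_append_left _ (hout x h)
        · exact List.mem_append_right _ h)
      hK
      (by
        intro x hx
        rcases List.mem_append.mp hx with h | h
        · exact houtU x h
        · simp at h; subst h; exact hmU)
      hh1 hd1' hh'
      (by
        intro k x hx
        by_cases hk : k = target
        · rw [hk] at hx
          rw [PySem.Dict.getD_insert_self] at hx
          rcases List.mem_append.mp hx with h | h
          · exact hd1' target x (by rw [PySem.Dict.getD_insert_self]; exact h)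
          · exact pvWalkB_subset U dct0 _ _ _ _ x h
        · rw [PySem.Dict.getD_insert_of_ne _ _ _ hk] at hx
          exact hd0 k x hx)) ?_
    exact pvLoopA_congr U target _ _ _ _ _ _ (by simp) (by simp) rfl _ _ hh' hd'

theorem pvOuterAB (keys : List String) (dct : PySem.Dict String (List String)) :
    pvOuterA keys dct = pvOuterB keys dct := by
  induction keys generalizing dct with
  | nil => rfl
  | cons t ks ih =>
    rw [pvOuterA, pvOuterB, ih]
    congr 1
    have hns0 : ∀ x ∈ (dct.getD t []).reverse,
        x ∈ dct.getD t [] ++ (dct.insert t ([] : List String)).values.flatten :=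
      fun x hx => List.mem_append_left _ (List.mem_reverse.mp hx)
    have hd00 : ∀ k : String, ∀ x ∈ dct.getD k [],
        x ∈ dct.getD t [] ++ (dct.insert t ([] : List String)).values.flatten := by
      intro k x hx
      by_cases hk : k = t
      · rw [hk] at hx; exact List.mem_append_left _ hx
      · refine List.mem_append_right _ (pvGetDFlat _ k x ?_)
        rw [PySem.Dict.getD_insert_of_ne _ _ _ hk]
        exact hx
    have hh2' : ∀ x ∈ [] ++ ((dct.getD t []).reverse).reverse,
        x ∈ dct.getD t [] ++ (dct.insert t ([] : List String)).values.flatten := by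
      intro x hx
      simp only [List.nil_append, List.reverse_reverse] at hx
      exact List.mem_append_left _ hx
    have hd2' : ∀ k : String, ∀ x ∈ (dct.insert t ([] : List String)).getD k [],
        x ∈ dct.getD t [] ++ (dct.insert t ([] : List String)).values.flatten :=
      fun k x hx => List.mem_append_right _ (pvGetDFlat _ k x hx)
    have hh3' : ∀ x ∈ ([] : List String),
        x ∈ dct.getD t [] ++ (dct.insert t ([] : List String)).values.flatten := by simp
    have hd3' : ∀ k : String, ∀ x ∈ (dct.insert t
          ([] ++ pvWalkB (dct.getD t [] ++ (dct.insert t ([] : List String)).values.flatten)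
            dct [t] (dct.getD t []).reverse hns0 hd00)).getD k [],
        x ∈ dct.getD t [] ++ (dct.insert t ([] : List String)).values.flatten := by
      intro k x hx
      by_cases hk : k = t
      · rw [hk] at hx
        rw [PySem.Dict.getD_insert_self] at hx
        exact pvWalkB_subset _ dct _ _ _ _ x (by simpa using hx)
      · rw [PySem.Dict.getD_insert_of_ne _ _ _ hk] at hx
        refine List.mem_append_right _ (pvGetDFlat _ k x ?_)
        rw [PySem.Dict.getD_insert_of_ne _ _ _ hk]
        exact hx
    have hre : dct.getD t [] = [] ++ ((dct.getD t []).reverse).reverse := by simp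
    have hsim := pvSIM (dct.getD t [] ++ (dct.insert t ([] : List String)).values.flatten) t dct
      [t] (dct.getD t []).reverse hns0 hd00 [] []
      (by simp) (by simp) (by simp) (by simp)
      hh2' hd2' hh3' hd3'
    refine Eq.trans (pvLoopA_congr _ t _ _ _ _ _ _ rfl rfl hre _ _ hh2' hd2') ?_
    refine Eq.trans hsim ?_
    refine Eq.trans (pvLoopA_nil _ _ _ _ _ _) ?_
    congr 1

-- ===== VERDICT (by name: the statement is the Claim_ definition above) =====
theorem member_refs_spec : Claim_equal_member_refs := by
  intro dct _
  unfold Spec_member_refs member_refs member_refs_alt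
  rw [pvOuterAB]
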